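-- pv_equiv track=rewrite | github.com/ItzikEzra-rh/UnifAI | multi-agent/graph/validation/structural/cycle_detector.py | _cycle_has_exit
-- ===== SOURCE A (Python) =====
-- from typing import List, Set, Dict, Tuple
-- from collections import deque
--
-- def _cycle_has_exit(
--
--     cycle_nodes: Set[str],
--     adjacency: Dict[str, Set[str]],
--     terminal_nodes: Set[str],
-- ) -> bool:
--     """Return True if a path exists from the cycle to any terminal node."""
--     q = deque(cycle_nodes)
--     visited = set(cycle_nodes)
--
--     while q:
--         node = q.popleft()
--         for neighbor in adjacency.get(node, set()):
--             if neighbor in visited: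
--                 continue
--             if neighbor in terminal_nodes:
--                 return True  # Found an exit path
--             visited.add(neighbor)
--             q.append(neighbor)
--
--     return False  # No exits found
-- ===== SOURCE B (Python) =====
-- def _cycle_has_exit(
--
--     cycle_nodes,
--     adjacency,
--     terminal_nodes,
-- ):
--     """Return True if a path exists from the cycle to any terminal node.
--
--     Recursive depth-first search: starting from each cycle node in turn,
--     walk outgoing edges, reporting success as soon as an unvisited terminal
--     neighbor is seen, and recursing into unvisited non-terminal neighbors."""
--     visited = set(cycle_nodes)
--
--     def dfs(node):
--         for neighbor in adjacency.get(node, set()):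
--             if neighbor in visited:
--                 continue
--             if neighbor in terminal_nodes:
--                 return True
--             visited.add(neighbor)
--             if dfs(neighbor):
--                 return True
--         return False
--
--     return any(dfs(node) for node in cycle_nodes)
-- ===== Notes on version B (the rewrite author's own statement) =====
-- stated objective: alternative
-- what changed: Replaced the iterative breadth-first search over an explicit deque frontier by a recursive depth-first search (a shared visited set seeded with the cycle, an inner recursive dfs helper, no frontier container).
import Mathlib
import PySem

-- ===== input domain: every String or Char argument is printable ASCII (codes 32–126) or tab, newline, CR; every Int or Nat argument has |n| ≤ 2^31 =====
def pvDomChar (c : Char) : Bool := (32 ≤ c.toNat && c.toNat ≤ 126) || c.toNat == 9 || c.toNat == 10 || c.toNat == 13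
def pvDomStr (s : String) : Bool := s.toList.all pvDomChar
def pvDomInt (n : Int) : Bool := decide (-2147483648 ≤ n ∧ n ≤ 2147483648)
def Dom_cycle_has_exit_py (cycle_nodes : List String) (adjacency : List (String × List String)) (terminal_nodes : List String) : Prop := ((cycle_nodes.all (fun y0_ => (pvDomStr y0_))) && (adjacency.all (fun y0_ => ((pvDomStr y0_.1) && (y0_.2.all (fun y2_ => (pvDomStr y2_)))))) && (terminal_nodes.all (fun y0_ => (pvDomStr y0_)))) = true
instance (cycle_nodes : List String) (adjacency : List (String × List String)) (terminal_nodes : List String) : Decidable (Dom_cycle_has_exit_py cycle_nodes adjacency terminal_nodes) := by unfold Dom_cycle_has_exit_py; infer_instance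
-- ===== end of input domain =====

-- One honest line: B replaces A's deque-based breadth-first search by a recursive
-- depth-first search sharing the same visited set (objective: alternative decomposition).
-- Proved: equal return values on all inputs (both searches decide the same reachability fact).

-- shared trivial helper: adjacency.get(node, set())
def pvAdj (adjacency : List (String × List String)) (node : String) : List String :=
  (PySem.Dict.get? ⟨adjacency⟩ node).getD []

-- all strings occurring in adjacency values (only used for termination measures / fuel)
def pvUniv (adjacency : List (String × List String)) : List String :=
  adjacency.flatMap Prod.snd

-- number of universe elements not yet visited (termination measure)
def pvF (adjacency : List (String × List String)) (visited : List String) : Nat :=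
  ((pvUniv adjacency).filter (fun x => decide (x ∉ visited))).length

-- ===== PORT A =====
-- the body of A's inner 'for neighbor in adjacency.get(node, set())' loop:
-- threads (visited, q), first component true = the 'return True' exit
def chInner (terminal : List String) (ns : List String) (visited q : List String) :
    Bool × List String × List String :=
  match ns with
  | [] => (false, visited, q)
  | n :: rest =>
    if n ∈ visited then chInner terminal rest visited q
    else if n ∈ terminal then (true, visited, q)
    else chInner terminal rest (PySem.Set.add visited n) (q ++ [n])

-- support lemmas the port's termination proof cites
theorem pvSet_add_not_mem (visited : List String) (n : String) (h : n ∉ visited) :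
    PySem.Set.add visited n = visited ++ [n] := by
  simp [PySem.Set.add, PySem.Set.contains, h]
theorem chInner_spec (terminal : List String) :
    ∀ (ns visited q : List String) (b : Bool) (v' q' : List String),
      chInner terminal ns visited q = (b, v', q') →
      ∃ new, v' = visited ++ new ∧ q' = q ++ new ∧ new.Nodup ∧
        (∀ x ∈ new, x ∈ ns ∧ x ∉ visited ∧ x ∉ terminal) ∧
        (b = true → ∃ n ∈ ns, n ∈ terminal ∧ n ∉ visited) ∧
        (b = false → ∀ n ∈ ns, n ∈ v') := by
  intro ns
  induction ns with
  | nil =>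
    intro visited q b v' q' h
    simp [chInner] at h
    obtain ⟨hb, hv, hq⟩ := h
    exact ⟨[], by simp [hv.symm], by simp [hq.symm], by simp, by simp, by simp [hb.symm], by simp⟩
  | cons n rest ih =>
    intro visited q b v' q' h
    simp only [chInner] at h
    by_cases hvis : n ∈ visited
    · rw [if_pos hvis] at h
      obtain ⟨new, h1, h2, h3, h4, h5, h6⟩ := ih visited q b v' q' h
      refine ⟨new, h1, h2, h3, ?_, ?_, ?_⟩
      · exact fun x hx => ⟨List.mem_cons_of_mem _ ((h4 x hx).1), (h4 x hx).2⟩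
      · intro hb; obtain ⟨m, hm1, hm2⟩ := h5 hb; exact ⟨m, List.mem_cons_of_mem _ hm1, hm2⟩
      · intro hb x hx
        rcases List.mem_cons.1 hx with rfl | hx'
        · exact h1 ▸ List.mem_append_left _ hvis
        · exact h6 hb x hx'
    · rw [if_neg hvis] at h
      by_cases hterm : n ∈ terminal
      · rw [if_pos hterm] at h
        injection h with hb h'; injection h' with hv hq
        subst hv; subst hq
        refine ⟨[], by simp, by simp, by simp, by simp, ?_, ?_⟩
        · intro _; exact ⟨n, List.mem_cons_self, hterm, hvis⟩
        · intro hfalse; simp [hb.symm] at hfalse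
      · rw [if_neg hterm, pvSet_add_not_mem visited n hvis] at h
        obtain ⟨new, h1, h2, h3, h4, h5, h6⟩ := ih (visited ++ [n]) (q ++ [n]) b v' q' h
        refine ⟨n :: new, by simp [h1], by simp [h2], ?_, ?_, ?_, ?_⟩
        · exact List.nodup_cons.2 ⟨fun hc => ((h4 n hc).2.1 (by simp)), h3⟩
        · intro x hx
          rcases List.mem_cons.1 hx with rfl | hx'
          · exact ⟨List.mem_cons_self, hvis, hterm⟩
          · obtain ⟨q1, q2, q3⟩ := h4 x hx'
            exact ⟨List.mem_cons_of_mem _ q1, fun hc => q2 (List.mem_append_left _ hc), q3⟩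
        · intro hb; obtain ⟨m, hm1, hm2, hm3⟩ := h5 hb
          exact ⟨m, List.mem_cons_of_mem _ hm1, hm2, fun hc => hm3 (List.mem_append_left _ hc)⟩
        · intro hb x hx
          rcases List.mem_cons.1 hx with rfl | hx'
          · exact h1 ▸ List.mem_append_left _ (List.mem_append_right _ (by simp))
          · exact h6 hb x hx'
theorem dictGet_mem_values : ∀ (l : List (String × List String)) (k : String) (v : List String),
    PySem.Dict.get? ⟨l⟩ k = some v → v ∈ l.map Prod.snd := by
  intro l
  induction l with
  | nil => intro k v h; simp [PySem.Dict.get?] at h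
  | cons p rest ih =>
    intro k v h
    obtain ⟨k', v'⟩ := p
    rw [PySem.Dict.get?_mk_cons] at h
    by_cases hk : k' == k
    · rw [if_pos hk] at h; injection h with h; simp [h]
    · rw [if_neg hk] at h; exact List.mem_cons_of_mem _ (ih k v h)
theorem pvAdj_sub (adjacency : List (String × List String)) (node x : String)
    (hx : x ∈ pvAdj adjacency node) : x ∈ pvUniv adjacency := by
  unfold pvAdj at hx
  cases h : PySem.Dict.get? ⟨adjacency⟩ node with
  | none => rw [h] at hx; simp at hx
  | some v =>
    rw [h] at hx
    simp only [Option.getD_some] at hx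
    have := dictGet_mem_values adjacency node v h
    simp only [pvUniv, List.mem_flatMap]
    obtain ⟨p, hp, hpv⟩ := List.mem_map.1 this
    exact ⟨p, hp, hpv ▸ hx⟩
theorem pvF_drop (adjacency : List (String × List String)) :
    ∀ (new visited : List String), new.Nodup →
      (∀ x ∈ new, x ∈ pvUniv adjacency ∧ x ∉ visited) →
      pvF adjacency (visited ++ new) + new.length ≤ pvF adjacency visited := by
  intro new
  induction new with
  | nil => intro visited _ _; simp [pvF]
  | cons n rest ih =>
    intro visited hnd hmem
    have hstep : pvF adjacency (visited ++ [n]) + 1 ≤ pvF adjacency visited := by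
      have hn : n ∈ (pvUniv adjacency).filter (fun x => decide (x ∉ visited)) := by
        simp [List.mem_filter, (hmem n (by simp)).1, (hmem n (by simp)).2]
      have heq : (pvUniv adjacency).filter (fun x => decide (x ∉ visited ++ [n]))
          = ((pvUniv adjacency).filter (fun x => decide (x ∉ visited))).filter (fun x => decide (x ≠ n)) := by
        rw [List.filter_filter]
        apply List.filter_congr
        intro x _
        simp [List.mem_append]
        rw [Bool.and_comm]
      have hlt : (((pvUniv adjacency).filter (fun x => decide (x ∉ visited))).filter (fun x => decide (x ≠ n))).length
          < ((pvUniv adjacency).filter (fun x => decide (x ∉ visited))).length := by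
        apply List.length_filter_lt_length_iff_exists.2
        exact ⟨n, hn, by simp⟩
      unfold pvF
      rw [heq]
      omega
    have hrest := ih (visited ++ [n]) (List.nodup_cons.1 hnd).2 ?_
    · have : visited ++ [n] ++ rest = visited ++ (n :: rest) := by simp
      rw [this] at hrest
      simp only [List.length_cons]
      omega
    · intro x hx
      refine ⟨(hmem x (List.mem_cons_of_mem _ hx)).1, ?_⟩
      intro hc
      rcases List.mem_append.1 hc with h1 | h1
      · exact (hmem x (List.mem_cons_of_mem _ hx)).2 h1
      · exact (List.nodup_cons.1 hnd).1 (by simpa using (List.mem_singleton.1 h1) ▸ hx)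
-- A's 'while q:' loop
def chLoop (adjacency : List (String × List String)) (terminal : List String)
    (q visited : List String) : Bool :=
  match q with
  | [] => false
  | node :: qrest =>
    match h : chInner terminal (pvAdj adjacency node) visited qrest with
    | (true, _, _) => true
    | (false, visited', q') => chLoop adjacency terminal q' visited'
termination_by pvF adjacency visited + q.length
decreasing_by
  obtain ⟨new, hv, hq, hnd, hmem, -, -⟩ :=
    chInner_spec terminal (pvAdj adjacency node) visited qrest false visited' q' h
  subst hv hq
  have hdrop := pvF_drop adjacency new visited hnd
    (fun x hx => ⟨pvAdj_sub adjacency node x (hmem x hx).1, (hmem x hx).2.1⟩)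
  simp only [List.length_append, List.length_cons]
  omega

def cycle_has_exit_py (cycle_nodes : List String) (adjacency : List (String × List String)) (terminal_nodes : List String) : Bool :=
  -- q = deque(cycle_nodes); visited = set(cycle_nodes)
  chLoop adjacency terminal_nodes (PySem.Set.ofList cycle_nodes) (PySem.Set.ofList cycle_nodes)

-- ===== PORT B =====
-- B's recursive dfs: dfsGo walks the neighbor list ns of the current node,
-- recursing into unvisited non-terminal neighbors; the Nat fuel is a totality
-- guard only (the initial fuel below always suffices)
def dfsGo (adjacency : List (String × List String)) (terminal : List String) :
    Nat → List String → List String → Bool × List String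
  | fuel, visited, ns =>
    match ns with
    | [] => (false, visited)
    | n :: rest =>
      if n ∈ visited then dfsGo adjacency terminal fuel visited rest
      else if n ∈ terminal then (true, visited)
      else
        match fuel with
        | 0 => (false, visited)  -- totality guard only; unreachable from the initial fuel below
        | fuel' + 1 =>
          match dfsGo adjacency terminal fuel' (PySem.Set.add visited n) (pvAdj adjacency n) with
          | (true, visited') => (true, visited')
          | (false, visited') => dfsGo adjacency terminal (fuel' + 1) visited' rest
termination_by fuel _ ns => (fuel, ns.length)

-- B's 'any(dfs(node) for node in cycle_nodes)'
def dfsTop (adjacency : List (String × List String)) (terminal : List String)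
    (seeds visited : List String) : Bool :=
  match seeds with
  | [] => false
  | s :: rest =>
    match dfsGo adjacency terminal (pvUniv adjacency).length visited (pvAdj adjacency s) with
    | (true, _) => true
    | (false, visited') => dfsTop adjacency terminal rest visited'

def cycle_has_exit_py_alt (cycle_nodes : List String) (adjacency : List (String × List String)) (terminal_nodes : List String) : Bool :=
  dfsTop adjacency terminal_nodes (PySem.Set.ofList cycle_nodes) (PySem.Set.ofList cycle_nodes)

-- ===== PRECONDITION & SPEC =====
def Spec_cycle_has_exit_py (cycle_nodes : List String) (adjacency : List (String × List String)) (terminal_nodes : List String) (out : Bool) : Prop := out = cycle_has_exit_py_alt cycle_nodes adjacency terminal_nodes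
instance (cycle_nodes : List String) (adjacency : List (String × List String)) (terminal_nodes : List String) (out : Bool) : Decidable (Spec_cycle_has_exit_py cycle_nodes adjacency terminal_nodes out) := by unfold Spec_cycle_has_exit_py; infer_instance

-- ===== CLAIM (what is proved, stated in full; the proofs are below) =====
def Claim_equal_cycle_has_exit_py : Prop := ∀ (cycle_nodes : List String) (adjacency : List (String × List String)) (terminal_nodes : List String), Dom_cycle_has_exit_py cycle_nodes adjacency terminal_nodes → Spec_cycle_has_exit_py cycle_nodes adjacency terminal_nodes (cycle_has_exit_py cycle_nodes adjacency terminal_nodes)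

-- ===== LEMMAS AND PROOFS =====

theorem pvLength_filter_mono {l : List String} {p q : String → Bool}
    (h : ∀ x, p x = true → q x = true) :
    (l.filter p).length ≤ (l.filter q).length := by
  induction l with
  | nil => simp
  | cons a l ih =>
    simp only [List.filter_cons]
    by_cases hp : p a = true
    · rw [if_pos hp, if_pos (h a hp)]; simpa using ih
    · rw [if_neg hp]
      split
      · exact Nat.le_succ_of_le (by simpa using ih)
      · simpa using ih

theorem pvF_anti (adjacency : List (String × List String)) (v1 v2 : List String)
    (h : ∀ x ∈ v1, x ∈ v2) : pvF adjacency v2 ≤ pvF adjacency v1 := by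
  apply pvLength_filter_mono
  intro x hx
  simp only [decide_eq_true_eq] at *
  exact fun hc => hx (h x hc)

-- nodes reachable from the seed set along edges avoiding terminal targets
inductive pvReach (adjacency : List (String × List String)) (terminal seeds : List String) : String → Prop
  | base {x : String} : x ∈ seeds → pvReach adjacency terminal seeds x
  | step {u v : String} : pvReach adjacency terminal seeds u → v ∈ pvAdj adjacency u →
      v ∉ terminal → pvReach adjacency terminal seeds v

-- the order-independent fact both searches decide
def pvExitS (adjacency : List (String × List String)) (terminal seeds : List String) : Prop :=
  ∃ u v, pvReach adjacency terminal seeds u ∧ v ∈ pvAdj adjacency u ∧ v ∈ terminal ∧ v ∉ seeds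

theorem closed_no_exit (adjacency : List (String × List String)) (terminal seeds visited : List String)
    (h0 : ∀ x ∈ seeds, x ∈ visited)
    (h2 : ∀ x ∈ visited, x ∈ terminal → x ∈ seeds)
    (hc : ∀ x ∈ visited, ∀ y ∈ pvAdj adjacency x, y ∈ visited) :
    ¬ pvExitS adjacency terminal seeds := by
  rintro ⟨u, v, hr, hv, ht, hns⟩
  have hreach : ∀ y, pvReach adjacency terminal seeds y → y ∈ visited := by
    intro y hy
    induction hy with
    | base hx => exact h0 _ hx
    | step hu hadj _ ihu => exact hc _ ihu _ hadj
  exact hns (h2 v (hc u (hreach u hr) v hv) ht)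

theorem chLoop_spec (adjacency : List (String × List String)) (terminal seeds : List String) :
    ∀ (q visited : List String),
      (∀ x ∈ seeds, x ∈ visited) →
      (∀ x ∈ visited, pvReach adjacency terminal seeds x) →
      (∀ x ∈ visited, x ∈ terminal → x ∈ seeds) →
      (∀ x ∈ q, x ∈ visited) →
      (∀ x ∈ visited, x ∈ q ∨ ∀ y ∈ pvAdj adjacency x, y ∈ visited) →
      ((chLoop adjacency terminal q visited = true → pvExitS adjacency terminal seeds) ∧
       (chLoop adjacency terminal q visited = false → ¬ pvExitS adjacency terminal seeds)) := by
  intro q visited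
  fun_induction chLoop adjacency terminal q visited with
  | case1 visited =>
    intro h0 _h1 h2 _h3 h4
    refine ⟨by simp, fun _ => ?_⟩
    exact closed_no_exit adjacency terminal seeds visited h0 h2
      (fun x hx => (h4 x hx).resolve_left (by simp))
  | case2 visited node rest v' q' h =>
    intro h0 h1 _h2 h3 _h4
    refine ⟨fun _ => ?_, by simp⟩
    obtain ⟨new, -, -, -, -, h5, -⟩ :=
      chInner_spec terminal (pvAdj adjacency node) visited rest true v' q' h
    obtain ⟨m, hm1, hm2, hm3⟩ := h5 rfl
    exact ⟨node, m, h1 node (h3 node List.mem_cons_self), hm1, hm2, fun hc => hm3 (h0 m hc)⟩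
  | case3 visited node rest visited' q' h ih =>
    intro h0 h1 h2 h3 h4
    obtain ⟨new, hv, hq, -, hmem, -, hdone⟩ :=
      chInner_spec terminal (pvAdj adjacency node) visited rest false visited' q' h
    subst hv hq
    have hnode : node ∈ visited := h3 node List.mem_cons_self
    apply ih
    · exact fun x hx => List.mem_append_left _ (h0 x hx)
    · intro x hx
      rcases List.mem_append.1 hx with hx' | hx'
      · exact h1 x hx'
      · exact .step (h1 node hnode) (hmem x hx').1 (hmem x hx').2.2
    · intro x hx hterm
      rcases List.mem_append.1 hx with hx' | hx'
      · exact h2 x hx' hterm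
      · exact absurd hterm (hmem x hx').2.2
    · intro x hx
      rcases List.mem_append.1 hx with hx' | hx'
      · exact List.mem_append_left _ (h3 x (List.mem_cons_of_mem _ hx'))
      · exact List.mem_append_right _ hx'
    · intro x hx
      rcases List.mem_append.1 hx with hx' | hx'
      · rcases h4 x hx' with hq | hD
        · rcases List.mem_cons.1 hq with rfl | hq'
          · exact Or.inr (hdone rfl)
          · exact Or.inl (List.mem_append_left _ hq')
        · exact Or.inr (fun y hy => List.mem_append_left _ (hD y hy))
      · exact Or.inl (List.mem_append_right _ hx')

theorem dfsGo_spec (adjacency : List (String × List String)) (terminal seeds : List String) :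
    ∀ (fuel : Nat) (visited ns : List String) (b : Bool) (visited' : List String),
      dfsGo adjacency terminal fuel visited ns = (b, visited') →
      (∀ x ∈ seeds, x ∈ visited) →
      (∀ x ∈ visited, pvReach adjacency terminal seeds x) →
      (∀ x ∈ visited, x ∈ terminal → x ∈ seeds) →
      (∃ u, pvReach adjacency terminal seeds u ∧ ∀ n ∈ ns, n ∈ pvAdj adjacency u) →
      (∀ x ∈ visited, x ∈ visited') ∧
      (∀ x ∈ visited', x ∈ visited ∨ (pvReach adjacency terminal seeds x ∧ x ∉ terminal)) ∧
      (b = true → pvExitS adjacency terminal seeds) ∧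
      (b = false → pvF adjacency visited ≤ fuel →
        (∀ n ∈ ns, n ∈ visited') ∧
        (∀ x ∈ visited', x ∉ visited → ∀ y ∈ pvAdj adjacency x, y ∈ visited')) := by
  intro fuel visited ns b visited' heq
  fun_induction dfsGo adjacency terminal fuel visited ns generalizing b visited' with
  | case1 fuel visited =>
    injection heq with hb hv; subst hb; subst hv
    intro _h0 _h1 _h2 _hu
    exact ⟨fun x hx => hx, fun x hx => Or.inl hx, by simp,
      fun _ _ => ⟨by simp, fun x hx hnx => absurd hx hnx⟩⟩
  | case2 fuel visited n rest hnvis ih =>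
    intro h0 h1 h2 hu
    obtain ⟨u, hru, hadju⟩ := hu
    obtain ⟨m1, m2, m3, m4⟩ := ih b visited' heq h0 h1 h2
      ⟨u, hru, fun k hk => hadju k (List.mem_cons_of_mem _ hk)⟩
    refine ⟨m1, m2, m3, fun hb hf => ?_⟩
    obtain ⟨f1, f2⟩ := m4 hb hf
    refine ⟨fun k hk => ?_, f2⟩
    rcases List.mem_cons.1 hk with rfl | hk'
    · exact m1 k hnvis
    · exact f1 k hk'
  | case3 fuel visited n rest hnvis hterm =>
    injection heq with hb hv; subst hb; subst hv
    intro h0 h1 h2 hu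
    obtain ⟨u, hru, hadju⟩ := hu
    refine ⟨fun x hx => hx, fun x hx => Or.inl hx, fun _ => ?_, fun hb => absurd hb (by simp)⟩
    exact ⟨u, n, hru, hadju n List.mem_cons_self, hterm, fun hc => hnvis (h0 n hc)⟩
  | case4 visited n rest hnvis hnterm =>
    injection heq with hb hv; subst hb; subst hv
    intro h0 h1 h2 hu
    obtain ⟨u, hru, hadju⟩ := hu
    refine ⟨fun x hx => hx, fun x hx => Or.inl hx, by simp, fun _ hf => absurd hf ?_⟩
    have hnU : n ∈ pvUniv adjacency := pvAdj_sub adjacency u n (hadju n List.mem_cons_self)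
    have hmemf : n ∈ (pvUniv adjacency).filter (fun x => decide (x ∉ visited)) :=
      List.mem_filter.2 ⟨hnU, by simpa using hnvis⟩
    have hpos := List.length_pos_of_mem hmemf
    unfold pvF
    omega
  | case5 visited n rest hnvis hnterm fuel' vis1 hinner ih =>
    injection heq with hb hv; subst hb; subst hv
    intro h0 h1 h2 hu
    obtain ⟨u, hru, hadju⟩ := hu
    have hadd : PySem.Set.add visited n = visited ++ [n] := pvSet_add_not_mem visited n hnvis
    have hRn : pvReach adjacency terminal seeds n :=
      .step hru (hadju n List.mem_cons_self) hnterm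
    have h0' : ∀ x ∈ seeds, x ∈ PySem.Set.add visited n :=
      fun x hx => hadd ▸ List.mem_append_left _ (h0 x hx)
    have h1' : ∀ x ∈ PySem.Set.add visited n, pvReach adjacency terminal seeds x := by
      rw [hadd]; intro x hx
      rcases List.mem_append.1 hx with hx' | hx'
      · exact h1 x hx'
      · exact (List.mem_singleton.1 hx') ▸ hRn
    have h2' : ∀ x ∈ PySem.Set.add visited n, x ∈ terminal → x ∈ seeds := by
      rw [hadd]; intro x hx hxt
      rcases List.mem_append.1 hx with hx' | hx'
      · exact h2 x hx' hxt
      · exact absurd ((List.mem_singleton.1 hx') ▸ hxt) hnterm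
    obtain ⟨m1, m2, m3, -⟩ := ih true vis1 hinner h0' h1' h2' ⟨n, hRn, fun k hk => hk⟩
    refine ⟨fun x hx => m1 x (hadd ▸ List.mem_append_left _ hx), fun x hx => ?_,
      fun _ => m3 rfl, fun hb => absurd hb (by simp)⟩
    rcases m2 x hx with hx' | hx'
    · rw [hadd] at hx'
      rcases List.mem_append.1 hx' with hx'' | hx''
      · exact Or.inl hx''
      · exact Or.inr ⟨(List.mem_singleton.1 hx'') ▸ hRn, (List.mem_singleton.1 hx'') ▸ hnterm⟩
    · exact Or.inr hx'
  | case6 visited n rest hnvis hnterm fuel' vis1 hinner ihi ihc =>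
    intro h0 h1 h2 hu
    obtain ⟨u, hru, hadju⟩ := hu
    have hadd : PySem.Set.add visited n = visited ++ [n] := pvSet_add_not_mem visited n hnvis
    have hnU : n ∈ pvUniv adjacency := pvAdj_sub adjacency u n (hadju n List.mem_cons_self)
    have hRn : pvReach adjacency terminal seeds n :=
      .step hru (hadju n List.mem_cons_self) hnterm
    have h0' : ∀ x ∈ seeds, x ∈ PySem.Set.add visited n :=
      fun x hx => hadd ▸ List.mem_append_left _ (h0 x hx)
    have h1' : ∀ x ∈ PySem.Set.add visited n, pvReach adjacency terminal seeds x := by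
      rw [hadd]; intro x hx
      rcases List.mem_append.1 hx with hx' | hx'
      · exact h1 x hx'
      · exact (List.mem_singleton.1 hx') ▸ hRn
    have h2' : ∀ x ∈ PySem.Set.add visited n, x ∈ terminal → x ∈ seeds := by
      rw [hadd]; intro x hx hxt
      rcases List.mem_append.1 hx with hx' | hx'
      · exact h2 x hx' hxt
      · exact absurd ((List.mem_singleton.1 hx') ▸ hxt) hnterm
    obtain ⟨i1, i2, -, i4⟩ := ihi false vis1 hinner h0' h1' h2' ⟨n, hRn, fun k hk => hk⟩
    have c1 : ∀ x ∈ vis1, pvReach adjacency terminal seeds x := by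
      intro x hx
      rcases i2 x hx with hx' | hx'
      · exact h1' x hx'
      · exact hx'.1
    have c2 : ∀ x ∈ vis1, x ∈ terminal → x ∈ seeds := by
      intro x hx hxt
      rcases i2 x hx with hx' | hx'
      · exact h2' x hx' hxt
      · exact absurd hxt hx'.2
    obtain ⟨j1, j2, j3, j4⟩ := ihc b visited' heq (fun x hx => i1 x (h0' x hx)) c1 c2
      ⟨u, hru, fun k hk => hadju k (List.mem_cons_of_mem _ hk)⟩
    have hmono : ∀ x ∈ visited, x ∈ visited' :=
      fun x hx => j1 x (i1 x (hadd ▸ List.mem_append_left _ hx))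
    refine ⟨hmono, fun x hx => ?_, j3, fun hb hf => ?_⟩
    · rcases j2 x hx with hx' | hx'
      · rcases i2 x hx' with hx'' | hx''
        · rw [hadd] at hx''
          rcases List.mem_append.1 hx'' with h3 | h3
          · exact Or.inl h3
          · exact Or.inr ⟨(List.mem_singleton.1 h3) ▸ hRn, (List.mem_singleton.1 h3) ▸ hnterm⟩
        · exact Or.inr hx''
      · exact Or.inr hx'
    · -- fuel accounting
      have hdrop := pvF_drop adjacency [n] visited (List.nodup_singleton n)
        (by intro x hx; rw [List.mem_singleton.1 hx]; exact ⟨hnU, hnvis⟩)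
      simp only [List.length_cons, List.length_nil] at hdrop
      have hF1 : pvF adjacency (PySem.Set.add visited n) ≤ fuel' := by
        rw [hadd]; omega
      obtain ⟨f1i, f2i⟩ := i4 rfl hF1
      have hF2 : pvF adjacency vis1 ≤ fuel' + 1 :=
        le_trans (pvF_anti adjacency (PySem.Set.add visited n) vis1 i1) (le_trans hF1 (Nat.le_succ _))
      obtain ⟨f1j, f2j⟩ := j4 hb hF2
      constructor
      · intro k hk
        rcases List.mem_cons.1 hk with rfl | hk'
        · exact j1 k (i1 k (hadd ▸ List.mem_append_right _ (List.mem_singleton_self k)))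
        · exact f1j k hk'
      · intro x hx hnx
        by_cases hx1 : x ∈ vis1
        · by_cases hxa : x ∈ PySem.Set.add visited n
          · rw [hadd] at hxa
            rcases List.mem_append.1 hxa with h3 | h3
            · exact absurd h3 hnx
            · intro y hy
              exact j1 y (f1i y ((List.mem_singleton.1 h3) ▸ hy))
          · intro y hy
            exact j1 y (f2i x hx1 hxa y hy)
        · exact f2j x hx hx1

theorem dfsTop_spec (adjacency : List (String × List String)) (terminal seeds0 : List String) :
    ∀ (seeds visited : List String),
      (∀ x ∈ seeds0, x ∈ visited) →
      (∀ x ∈ visited, pvReach adjacency terminal seeds0 x) →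
      (∀ x ∈ visited, x ∈ terminal → x ∈ seeds0) →
      (∀ s ∈ seeds, s ∈ seeds0) →
      (∀ x ∈ visited, x ∈ seeds ∨ ∀ y ∈ pvAdj adjacency x, y ∈ visited) →
      ((dfsTop adjacency terminal seeds visited = true → pvExitS adjacency terminal seeds0) ∧
       (dfsTop adjacency terminal seeds visited = false → ¬ pvExitS adjacency terminal seeds0)) := by
  intro seeds
  induction seeds with
  | nil =>
    intro visited h0 _h1 h2 _hs h4
    refine ⟨by simp [dfsTop], fun _ => ?_⟩
    exact closed_no_exit adjacency terminal seeds0 visited h0 h2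
      (fun x hx => (h4 x hx).resolve_left (by simp))
  | cons s rest ih =>
    intro visited h0 h1 h2 hs h4
    have hsR : pvReach adjacency terminal seeds0 s := .base (hs s List.mem_cons_self)
    cases hgo : dfsGo adjacency terminal (pvUniv adjacency).length visited (pvAdj adjacency s) with
    | mk b vis1 =>
      obtain ⟨m1, m2, m3, m4⟩ := dfsGo_spec adjacency terminal seeds0 _ visited _ b vis1 hgo
        h0 h1 h2 ⟨s, hsR, fun k hk => hk⟩
      cases b with
      | true =>
        have hred : dfsTop adjacency terminal (s :: rest) visited = true := by
          simp [dfsTop, hgo]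
        refine ⟨fun _ => m3 rfl, fun hf => ?_⟩
        rw [hred] at hf; cases hf
      | false =>
        have hred : dfsTop adjacency terminal (s :: rest) visited
            = dfsTop adjacency terminal rest vis1 := by
          simp [dfsTop, hgo]
        obtain ⟨f1, f2⟩ := m4 rfl (List.length_filter_le _ _)
        rw [hred]
        apply ih vis1
        · exact fun x hx => m1 x (h0 x hx)
        · intro x hx
          rcases m2 x hx with hx' | hx'
          · exact h1 x hx'
          · exact hx'.1
        · intro x hx hxt
          rcases m2 x hx with hx' | hx'
          · exact h2 x hx' hxt
          · exact absurd hxt hx'.2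
        · exact fun k hk => hs k (List.mem_cons_of_mem _ hk)
        · intro x hx
          by_cases hxv : x ∈ visited
          · rcases h4 x hxv with hseq | hD
            · rcases List.mem_cons.1 hseq with rfl | hr
              · exact Or.inr (fun y hy => f1 y hy)
              · exact Or.inl hr
            · exact Or.inr (fun y hy => m1 y (hD y hy))
          · exact Or.inr (f2 x hx hxv)

theorem A_iff (cycle_nodes : List String) (adjacency : List (String × List String)) (terminal_nodes : List String) :
    cycle_has_exit_py cycle_nodes adjacency terminal_nodes = true ↔
      pvExitS adjacency terminal_nodes (PySem.Set.ofList cycle_nodes) := by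
  have h := chLoop_spec adjacency terminal_nodes (PySem.Set.ofList cycle_nodes)
    (PySem.Set.ofList cycle_nodes) (PySem.Set.ofList cycle_nodes)
    (fun x hx => hx) (fun _ hx => .base hx) (fun x _ _ => ‹x ∈ _›)
    (fun x hx => hx) (fun x hx => Or.inl hx)
  unfold cycle_has_exit_py
  refine ⟨h.1, fun hex => ?_⟩
  cases hcl : chLoop adjacency terminal_nodes (PySem.Set.ofList cycle_nodes) (PySem.Set.ofList cycle_nodes) with
  | false => exact absurd hex (h.2 hcl)
  | true => rfl

theorem B_iff (cycle_nodes : List String) (adjacency : List (String × List String)) (terminal_nodes : List String) :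
    cycle_has_exit_py_alt cycle_nodes adjacency terminal_nodes = true ↔
      pvExitS adjacency terminal_nodes (PySem.Set.ofList cycle_nodes) := by
  have h := dfsTop_spec adjacency terminal_nodes (PySem.Set.ofList cycle_nodes)
    (PySem.Set.ofList cycle_nodes) (PySem.Set.ofList cycle_nodes)
    (fun x hx => hx) (fun _ hx => .base hx) (fun x _ _ => ‹x ∈ _›)
    (fun x hx => hx) (fun x hx => Or.inl hx)
  unfold cycle_has_exit_py_alt
  refine ⟨h.1, fun hex => ?_⟩
  cases hcl : dfsTop adjacency terminal_nodes (PySem.Set.ofList cycle_nodes) (PySem.Set.ofList cycle_nodes) with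
  | false => exact absurd hex (h.2 hcl)
  | true => rfl

-- ===== VERDICT (by name: the statement is the Claim_ definition above) =====
theorem cycle_has_exit_py_spec : Claim_equal_cycle_has_exit_py := by
  intro c a t _dom
  unfold Spec_cycle_has_exit_py
  rw [Bool.eq_iff_iff, A_iff, B_iff]
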